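-- pv_equiv track=rewrite | github.com/aleeds/Group-Theory | groups.py | GenerateAllWhiteheadAuts
-- ===== SOURCE A (Python) =====
-- def InverseChar(a):
--     if (a.lower() == a):
--         return a.upper()
--     else:
--         return a.lower()
--
-- def cont(y, Z):
--     return Z.count(y) > 0
--
-- def PowerSet(elems):
--     if (len(elems) == 0):
--         return []
--     elif (len(elems) == 1):
--         return [[], elems]
--     else:
--         head, *tail = elems
--         p = PowerSet(tail)
--         return [[head] + i for i in p] + p
--
-- def GenerateAllWhiteheadAuts(gens):
--     ret = []
--     big_gens = gens + [InverseChar(i) for i in gens]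
--     for x in big_gens:
--         gensTwo = [i for i in big_gens if x != InverseChar(i)]
--         power_set = PowerSet(gensTwo)
--         for s in power_set:
--             if (cont(x, s)):
--                 ret.append((x, s))
--     return ret
-- ===== SOURCE B (Python) =====
-- def InverseChar(a):
--     if (a.lower() == a):
--         return a.upper()
--     else:
--         return a.lower()
--
-- def PowerSetIter(elems):
--     if not elems:
--         return []
--     acc = [[], [elems[-1]]]
--     for e in reversed(elems[:-1]):
--         acc = [[e] + s for s in acc] + acc
--     return acc
--
-- def GenerateAllWhiteheadAuts(gens):
--     big_gens = gens + [InverseChar(i) for i in gens]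
--     return [(x, s)
--             for x in big_gens
--             for s in PowerSetIter([i for i in big_gens if x != InverseChar(i)])
--             if x in s]
-- ===== Notes on version B (the rewrite author's own statement) =====
-- stated objective: alternative
-- what changed: PowerSet is rewritten from recursion to an iterative accumulator loop seeded with the empty set and the last-element singleton and folded right-to-left, and the outer append-loop with the count-based cont helper becomes a single comprehension with a membership test.
import Mathlib
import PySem

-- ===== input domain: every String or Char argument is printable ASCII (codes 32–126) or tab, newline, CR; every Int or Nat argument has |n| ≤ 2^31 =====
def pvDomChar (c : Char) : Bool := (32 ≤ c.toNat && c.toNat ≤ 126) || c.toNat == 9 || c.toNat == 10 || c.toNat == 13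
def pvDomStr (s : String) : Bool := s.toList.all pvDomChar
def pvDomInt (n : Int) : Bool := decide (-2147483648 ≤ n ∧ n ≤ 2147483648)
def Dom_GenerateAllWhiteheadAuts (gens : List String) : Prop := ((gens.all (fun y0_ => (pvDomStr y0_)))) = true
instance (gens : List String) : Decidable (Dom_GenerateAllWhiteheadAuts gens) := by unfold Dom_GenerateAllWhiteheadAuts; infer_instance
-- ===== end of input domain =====

-- B replaces the recursive PowerSet by an iterative accumulator loop (seeded with the
-- empty subset and the last-element singleton, folded right-to-left) and the outer
-- append-loop by a comprehension (alternative decomposition; same cost).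

-- ===== PORT A =====
def InverseCharL (a : String) : String :=
  if PySem.Str.lower a = a then PySem.Str.upper a else PySem.Str.lower a

def contL (y : String) (Z : List String) : Bool :=
  PySem.List.count Z y > 0

def PowerSetA : List String → List (List String)
  | [] => []
  | [x] => [[], [x]]
  | head :: tail => (PowerSetA tail).map (fun i => head :: i) ++ PowerSetA tail

def GenerateAllWhiteheadAuts (gens : List String) : List (String × List String) :=
  let big_gens := gens ++ gens.map (fun i => InverseCharL i)
  big_gens.foldl (fun ret x =>
    let gensTwo := big_gens.filter (fun i => x ≠ InverseCharL i)
    let power_set := PowerSetA gensTwo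
    power_set.foldl (fun r s => if contL x s then r ++ [(x, s)] else r) ret) []

-- ===== PORT B =====
-- iterative PowerSet: seed [[], [last]], fold the remaining elements right-to-left
-- (foldr over elems[:-1] = the Python loop over reversed(elems[:-1]))
def PowerSetB : List String → List (List String)
  | [] => []
  | e :: rest =>
    ((e :: rest).dropLast).foldr (fun a acc => acc.map (fun s => a :: s) ++ acc)
      [[], [(e :: rest).getLastD ""]]

def GenerateAllWhiteheadAuts_alt (gens : List String) : List (String × List String) :=
  let big_gens := gens ++ gens.map (fun i => InverseCharL i)
  big_gens.flatMap (fun x =>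
    ((PowerSetB (big_gens.filter (fun i => x ≠ InverseCharL i))).filter
        (fun s => s.contains x)).map (fun s => (x, s)))

-- ===== PRECONDITION & SPEC =====
def Spec_GenerateAllWhiteheadAuts (gens : List String) (out : List (String × List String)) : Prop := out = GenerateAllWhiteheadAuts_alt gens
instance (gens : List String) (out : List (String × List String)) : Decidable (Spec_GenerateAllWhiteheadAuts gens out) := by unfold Spec_GenerateAllWhiteheadAuts; infer_instance

-- ===== CLAIM (what is proved, stated in full; the proofs are below) =====
def Claim_equal_GenerateAllWhiteheadAuts : Prop := ∀ (gens : List String), Dom_GenerateAllWhiteheadAuts gens → Spec_GenerateAllWhiteheadAuts gens (GenerateAllWhiteheadAuts gens)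

-- ===== LEMMAS AND PROOFS =====

theorem PowerSetB_eq (elems : List String) : PowerSetB elems = PowerSetA elems := by
  induction elems with
  | nil => rfl
  | cons h t ih =>
    cases t with
    | nil => rfl
    | cons y ts =>
      rw [PowerSetA, ← ih]
      simp [PowerSetB, List.dropLast]
      exact fun hh => List.cons_ne_nil _ _ hh

theorem contL_eq (x : String) (s : List String) : contL x s = s.contains x := by
  simp [contL, PySem.List.count_eq, List.count_pos_iff]

theorem inner_loop (x : String) (ps : List (List String))
    (ret : List (String × List String)) :
    ps.foldl (fun r s => if contL x s then r ++ [(x, s)] else r) ret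
      = ret ++ (ps.filter (fun s => contL x s)).map (fun s => (x, s)) := by
  induction ps generalizing ret with
  | nil => simp
  | cons s ps ih =>
    simp only [List.foldl_cons, List.filter_cons]
    cases hc : contL x s <;> simp [hc, ih]

theorem outer_loop (bg : List String) (l : List String)
    (ret : List (String × List String)) :
    l.foldl (fun ret x =>
        (PowerSetA (bg.filter (fun i => x ≠ InverseCharL i))).foldl
          (fun r s => if contL x s then r ++ [(x, s)] else r) ret) ret
      = ret ++ l.flatMap (fun x =>
          ((PowerSetA (bg.filter (fun i => x ≠ InverseCharL i))).filter
              (fun s => contL x s)).map (fun s => (x, s))) := by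
  induction l generalizing ret with
  | nil => simp
  | cons x l ih =>
    rw [List.foldl_cons, ih, inner_loop, List.flatMap_cons, List.append_assoc]

-- ===== VERDICT (by name: the statement is the Claim_ definition above) =====
theorem GenerateAllWhiteheadAuts_spec : Claim_equal_GenerateAllWhiteheadAuts := by
  intro gens _
  show GenerateAllWhiteheadAuts gens = GenerateAllWhiteheadAuts_alt gens
  unfold GenerateAllWhiteheadAuts GenerateAllWhiteheadAuts_alt
  rw [outer_loop, List.nil_append]
  apply List.flatMap_congr
  intro x _
  rw [PowerSetB_eq, List.filter_congr (fun s _ => contL_eq x s)]
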